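-- pv_equiv track=rewrite | github.com/seleneledain/forest_drought_forecasting | data_downloading/cloud_cleaning.py | find_max_consec_nan
-- ===== SOURCE A (Python) =====
-- def find_max_consec_nan(timeseries):
--     """
--     Returns maximum consecutive NaNs in a mask. Will also return the start index of these NaNs.
--     """
--     max_index = 0
--     max_count = 0  # Initialize max_count to 0 for counting NaNs
--     count = 0  # Initialize count to 0 for counting NaNs
--     for i, x in enumerate(timeseries):
--         if x:  # Check if the value is True (indicating NaN)
--             count += 1
--         else:
--             if count > max_count:
--                 max_count = count
--                 max_index = i - count  # Update max_index to the start index of consecutive NaNs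
--             count = 0  # Reset count when a non-NaN value is encountered
--     if count > max_count:  # Check if the maximum count occurs at the end of the series
--         max_count = count
--         max_index = len(timeseries) - count
--     return max_count, max_index
-- ===== SOURCE B (Python) =====
-- def find_max_consec_nan(timeseries):
--     """
--     Returns maximum consecutive NaNs in a mask. Will also return the start index of these NaNs.
--     Run-length encode the series first, then scan the runs once.
--     """
--     runs = []
--     for x in timeseries:
--         k = bool(x)
--         if runs and runs[-1][0] == k:
--             runs[-1][1] += 1
--         else:
--             runs.append([k, 1])
--     max_count = 0
--     max_index = 0
--     i = 0
--     for k, l in runs: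
--         if k and l > max_count:
--             max_count = l
--             max_index = i
--         i += l
--     return max_count, max_index
-- ===== Notes on version B (the rewrite author's own statement) =====
-- stated objective: alternative
-- what changed: B run-length-encodes the series into maximal runs and then scans the runs once with a running start index, instead of A's element-by-element counter with a deferred end-of-loop fixup.
import Mathlib
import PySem

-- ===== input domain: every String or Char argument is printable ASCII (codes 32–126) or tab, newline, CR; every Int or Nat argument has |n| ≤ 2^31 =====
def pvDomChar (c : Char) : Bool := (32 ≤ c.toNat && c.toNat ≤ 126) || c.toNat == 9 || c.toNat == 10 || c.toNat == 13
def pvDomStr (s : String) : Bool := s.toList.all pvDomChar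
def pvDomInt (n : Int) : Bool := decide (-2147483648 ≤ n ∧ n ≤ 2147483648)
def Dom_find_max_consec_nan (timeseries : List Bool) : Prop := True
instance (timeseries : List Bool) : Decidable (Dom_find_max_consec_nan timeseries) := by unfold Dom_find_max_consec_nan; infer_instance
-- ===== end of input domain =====

-- B groups the series into maximal runs and scans the runs once; A counts element by element
-- with an end-of-loop fixup. Same result is proved for every input (both are total).

-- ===== PORT A =====
-- A's for-loop over enumerate(timeseries), carried as structural recursion over the list with
-- the index `i` and the state (max_count, max_index, count); the trailing `if count > max_count`
-- check is the [] case (there i = len(timeseries)).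
def fmcnLoopA : List Bool → Int → Int → Int → Int → Int × Int
  | [], i, maxc, maxi, count =>
      if count > maxc then (count, i - count) else (maxc, maxi)
  | x :: xs, i, maxc, maxi, count =>
      if x then fmcnLoopA xs (i + 1) maxc maxi (count + 1)
      else if count > maxc then fmcnLoopA xs (i + 1) count (i - count) 0
      else fmcnLoopA xs (i + 1) maxc maxi 0

def find_max_consec_nan (timeseries : List Bool) : Int × Int :=
  fmcnLoopA timeseries 0 0 0 0

-- ===== PORT B =====
-- run-length encoding of the series: the list of (key, run length) of the maximal runs.
def fmcnRuns : List Bool → List (Bool × Int)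
  | [] => []
  | x :: xs =>
      match fmcnRuns xs with
      | [] => [(x, 1)]
      | (k, l) :: rest => if k = x then (x, l + 1) :: rest else (x, 1) :: (k, l) :: rest

-- B's second loop: scan the runs with a running start index i.
def fmcnLoopB : List (Bool × Int) → Int → Int → Int → Int × Int
  | [], _, maxc, maxi => (maxc, maxi)
  | (k, l) :: gs, i, maxc, maxi =>
      if k ∧ l > maxc then fmcnLoopB gs (i + l) l i
      else fmcnLoopB gs (i + l) maxc maxi

def find_max_consec_nan_alt (timeseries : List Bool) : Int × Int :=
  fmcnLoopB (fmcnRuns timeseries) 0 0 0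

-- ===== PRECONDITION & SPEC =====
def Spec_find_max_consec_nan (timeseries : List Bool) (out : Int × Int) : Prop := out = find_max_consec_nan_alt timeseries
instance (timeseries : List Bool) (out : Int × Int) : Decidable (Spec_find_max_consec_nan timeseries out) := by unfold Spec_find_max_consec_nan; infer_instance

-- ===== CLAIM (what is proved, stated in full; the proofs are below) =====
def Claim_equal_find_max_consec_nan : Prop := ∀ (timeseries : List Bool), Dom_find_max_consec_nan timeseries → Spec_find_max_consec_nan timeseries (find_max_consec_nan timeseries)

-- ===== LEMMAS AND PROOFS =====

-- A's loop with a pending run of `count` trues, replayed over a run list instead of elements.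
def fmcnF : List (Bool × Int) → Int → Int → Int → Int → Int × Int
  | [], i, maxc, maxi, count =>
      if count > maxc then (count, i - count) else (maxc, maxi)
  | (true, l) :: gs, i, maxc, maxi, count => fmcnF gs (i + l) maxc maxi (count + l)
  | (false, l) :: gs, i, maxc, maxi, count =>
      if count > maxc then fmcnF gs (i + l) count (i - count) 0
      else fmcnF gs (i + l) maxc maxi 0

-- well-formed run lists: alternating keys, all lengths ≥ 1 (what fmcnRuns produces)
def fmcnGood : List (Bool × Int) → Prop
  | [] => True
  | (_, l) :: [] => 1 ≤ l
  | (k, l) :: (k', l') :: gs => 1 ≤ l ∧ k' ≠ k ∧ fmcnGood ((k', l') :: gs)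

theorem fmcnGood_head {k : Bool} {l : Int} {gs : List (Bool × Int)}
    (h : fmcnGood ((k, l) :: gs)) : 1 ≤ l := by
  cases gs with
  | nil => exact h
  | cons q gs => exact h.1

theorem fmcnGood_tail {k : Bool} {l : Int} {gs : List (Bool × Int)}
    (h : fmcnGood ((k, l) :: gs)) : fmcnGood gs := by
  cases gs with
  | nil => trivial
  | cons q gs => obtain ⟨q1, q2⟩ := q; exact h.2.2

theorem fmcnRuns_good (xs : List Bool) : fmcnGood (fmcnRuns xs) := by
  induction xs with
  | nil => trivial
  | cons x xs ih =>
      simp only [fmcnRuns]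
      cases hr : fmcnRuns xs with
      | nil => exact le_refl 1
      | cons p rest =>
          obtain ⟨k, l⟩ := p
          rw [hr] at ih
          by_cases hk : k = x
          · subst hk
            simp only [if_pos rfl]
            have h1 : 1 ≤ l := fmcnGood_head ih
            cases rest with
            | nil => show (1:Int) ≤ l + 1; omega
            | cons q rest =>
                obtain ⟨k', l'⟩ := q
                exact ⟨by omega, ih.2.1, ih.2.2⟩
          · simp only [if_neg hk]
            exact ⟨le_refl 1, hk, ih⟩

-- A over the elements equals fmcnF over the run-length encoding (state stays nonnegative).
theorem fmcnLoopA_eq_F (xs : List Bool) : ∀ (i maxc maxi count : Int),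
    0 ≤ maxc → 0 ≤ count →
    fmcnLoopA xs i maxc maxi count = fmcnF (fmcnRuns xs) i maxc maxi count := by
  induction xs with
  | nil => intro i maxc maxi count _ _; rfl
  | cons x xs ih =>
      intro i maxc maxi count hm hc
      simp only [fmcnRuns]
      cases hr : fmcnRuns xs with
      | nil =>
          cases x with
          | true =>
              show fmcnLoopA xs (i + 1) maxc maxi (count + 1) = fmcnF [(true, 1)] i maxc maxi count
              rw [ih (i + 1) maxc maxi (count + 1) hm (by omega), hr]
              show fmcnF [] (i + 1) maxc maxi (count + 1) = fmcnF [] (i + 1) maxc maxi (count + 1)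
              rfl
          | false =>
              show (if count > maxc then fmcnLoopA xs (i + 1) count (i - count) 0
                    else fmcnLoopA xs (i + 1) maxc maxi 0) = fmcnF [(false, 1)] i maxc maxi count
              show _ = (if count > maxc then fmcnF [] (i + 1) count (i - count) 0
                    else fmcnF [] (i + 1) maxc maxi 0)
              split_ifs with h
              · rw [ih (i + 1) count (i - count) 0 (by omega) le_rfl, hr]
              · rw [ih (i + 1) maxc maxi 0 hm le_rfl, hr]
      | cons p rest =>
          obtain ⟨k, l⟩ := p
          cases x with
          | true =>
              have lhs : fmcnLoopA (true :: xs) i maxc maxi count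
                  = fmcnF ((k, l) :: rest) (i + 1) maxc maxi (count + 1) := by
                show fmcnLoopA xs (i + 1) maxc maxi (count + 1) = _
                rw [ih (i + 1) maxc maxi (count + 1) hm (by omega), hr]
              cases k with
              | true =>
                  simp only [if_pos rfl]
                  rw [lhs]
                  show fmcnF rest (i + 1 + l) maxc maxi (count + 1 + l)
                      = fmcnF rest (i + (l + 1)) maxc maxi (count + (l + 1))
                  have e1 : i + 1 + l = i + (l + 1) := by ring
                  have e2 : count + 1 + l = count + (l + 1) := by ring
                  rw [e1, e2]
              | false =>
                  simp only [Bool.false_eq_true, if_neg (by simp : ¬ (false = true))]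
                  rw [lhs]
                  rfl
          | false =>
              have lhs : fmcnLoopA (false :: xs) i maxc maxi count
                  = (if count > maxc then fmcnF ((k, l) :: rest) (i + 1) count (i - count) 0
                     else fmcnF ((k, l) :: rest) (i + 1) maxc maxi 0) := by
                show (if count > maxc then fmcnLoopA xs (i + 1) count (i - count) 0
                      else fmcnLoopA xs (i + 1) maxc maxi 0) = _
                split_ifs with h
                · rw [ih (i + 1) count (i - count) 0 (by omega) le_rfl, hr]
                · rw [ih (i + 1) maxc maxi 0 hm le_rfl, hr]
              cases k with
              | true =>
                  simp only [Bool.true_eq_false, if_neg (by simp : ¬ (true = false))]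
                  rw [lhs]
                  rfl
              | false =>
                  simp only [if_pos rfl]
                  rw [lhs]
                  show (if count > maxc then fmcnF ((false, l) :: rest) (i + 1) count (i - count) 0
                        else fmcnF ((false, l) :: rest) (i + 1) maxc maxi 0)
                      = (if count > maxc then fmcnF rest (i + (l + 1)) count (i - count) 0
                         else fmcnF rest (i + (l + 1)) maxc maxi 0)
                  have e1 : i + 1 + l = i + (l + 1) := by ring
                  split_ifs with h
                  · show (if (0:Int) > count then fmcnF rest (i + 1 + l) 0 (i + 1 - 0) 0
                          else fmcnF rest (i + 1 + l) count (i - count) 0) = _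
                    rw [if_neg (by omega : ¬ ((0:Int) > count)), e1]
                  · show (if (0:Int) > maxc then fmcnF rest (i + 1 + l) 0 (i + 1 - 0) 0
                          else fmcnF rest (i + 1 + l) maxc maxi 0) = _
                    rw [if_neg (by omega : ¬ ((0:Int) > maxc)), e1]

-- On good run lists with a resolved (zero) pending count, fmcnF is B's scan.
theorem fmcnF_eq_B : ∀ (gs : List (Bool × Int)) (i maxc maxi count : Int),
    fmcnGood gs → 0 ≤ maxc → 0 ≤ count →
    (count = 0 ∨ gs = [] ∨ ∃ l rest, gs = (false, l) :: rest) →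
    fmcnF gs i maxc maxi count =
      fmcnLoopB gs i (if count > maxc then count else maxc) (if count > maxc then i - count else maxi) := by
  intro gs
  induction gs with
  | nil =>
      intro i maxc maxi count _ _ _ _
      simp only [fmcnF, fmcnLoopB]
      split <;> rfl
  | cons p gs ih =>
      intro i maxc maxi count hg hm hc hpend
      obtain ⟨k, l⟩ := p
      have hl : 1 ≤ l := fmcnGood_head hg
      have hg' : fmcnGood gs := fmcnGood_tail hg
      cases k with
      | false =>
          show (if count > maxc then fmcnF gs (i + l) count (i - count) 0
                else fmcnF gs (i + l) maxc maxi 0) = _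
          have hB : ∀ m mi : Int, fmcnLoopB ((false, l) :: gs) i m mi = fmcnLoopB gs (i + l) m mi := by
            intro m mi
            show (if (false = true) ∧ l > m then fmcnLoopB gs (i + l) l i
                  else fmcnLoopB gs (i + l) m mi) = _
            rw [if_neg (by simp)]
          split_ifs with h
          · rw [ih (i + l) count (i - count) 0 hg' (by omega) le_rfl (Or.inl rfl),
              if_neg (by omega : ¬ ((0:Int) > count)),
              if_neg (by omega : ¬ ((0:Int) > count)), hB]
          · rw [ih (i + l) maxc maxi 0 hg' hm le_rfl (Or.inl rfl),
              if_neg (by omega : ¬ ((0:Int) > maxc)),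
              if_neg (by omega : ¬ ((0:Int) > maxc)), hB]
      | true =>
          have hcz : count = 0 := by
            rcases hpend with h | h | ⟨l', rest, h⟩
            · exact h
            · simp at h
            · simp at h
          subst hcz
          rw [if_neg (by omega : ¬ ((0:Int) > maxc)), if_neg (by omega : ¬ ((0:Int) > maxc))]
          have hnext : gs = [] ∨ ∃ l' rest, gs = (false, l') :: rest := by
            cases gs with
            | nil => left; rfl
            | cons q rest =>
                obtain ⟨k', l'⟩ := q
                have hne : k' ≠ true := hg.2.1
                cases k' with
                | false => right; exact ⟨l', rest, rfl⟩
                | true => exact absurd rfl hne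
          show fmcnF gs (i + l) maxc maxi (0 + l) = fmcnLoopB ((true, l) :: gs) i maxc maxi
          rw [ih (i + l) maxc maxi (0 + l) hg' hm (by omega) (Or.inr hnext)]
          show _ = (if (true = true) ∧ l > maxc then fmcnLoopB gs (i + l) l i
                    else fmcnLoopB gs (i + l) maxc maxi)
          split_ifs with h1 h2
          · have e2 : i + l - (0 + l) = i := by ring
            have e1 : (0:Int) + l = l := by ring
            rw [e2, e1]
          · exact absurd ⟨rfl, by omega⟩ h2
          · exact absurd (by omega : (0:Int) + l > maxc) h1
          · rfl

-- ===== VERDICT (by name: the statement is the Claim_ definition above) =====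
theorem find_max_consec_nan_spec : Claim_equal_find_max_consec_nan := by
  intro ts _
  show find_max_consec_nan ts = find_max_consec_nan_alt ts
  unfold find_max_consec_nan find_max_consec_nan_alt
  rw [fmcnLoopA_eq_F ts 0 0 0 0 le_rfl le_rfl,
    fmcnF_eq_B (fmcnRuns ts) 0 0 0 0 (fmcnRuns_good ts) le_rfl le_rfl (Or.inl rfl)]
  norm_num
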